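-- pv_equiv track=rewrite | github.com/fan-of-dark/Algorithms | DiagnolDiff.py | diagonalDifference
-- ===== SOURCE A (Python) =====
-- def diagonalDifference(arr):
--     n = len(arr)
--     i = j = 0
--     d1 = d2 = 0
--     while i < n and j < len(arr[0]):
--         d1+= arr[i][j]
--         i+= 1
--         j+= 1
--     i = 0
--     j = len(arr[0]) -1
--     while i < n and j >= 0:
--         d2 += arr[i][j]
--         i += 1
--         j -= 1
--     return abs(d1-d2)
-- ===== SOURCE B (Python) =====
-- def diagonalDifference(arr):
--     m = len(arr[0]) if arr else 0
--     return abs(_signed(arr, 0, m))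
--
-- def _signed(rows, k, m):
--     # signed sum of (row[k] - row[m-1-k]) down the remaining rows,
--     # built on the way back up by structural recursion over the row list
--     if not rows or k >= m:
--         return 0
--     row = rows[0]
--     return (row[k] - row[m - 1 - k]) + _signed(rows[1:], k + 1, m)
-- ===== Notes on version B (the rewrite author's own statement) =====
-- stated objective: alternative
-- what changed: Replaces A's two iterative accumulator while-loops (separate diagonal passes with mutable i/j/d1/d2 state) by a single structural recursion over the list of rows that returns the signed per-row difference row[k]-row[m-1-k] composed on the way back up, with abs taken once at the end.
import Mathlib
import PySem

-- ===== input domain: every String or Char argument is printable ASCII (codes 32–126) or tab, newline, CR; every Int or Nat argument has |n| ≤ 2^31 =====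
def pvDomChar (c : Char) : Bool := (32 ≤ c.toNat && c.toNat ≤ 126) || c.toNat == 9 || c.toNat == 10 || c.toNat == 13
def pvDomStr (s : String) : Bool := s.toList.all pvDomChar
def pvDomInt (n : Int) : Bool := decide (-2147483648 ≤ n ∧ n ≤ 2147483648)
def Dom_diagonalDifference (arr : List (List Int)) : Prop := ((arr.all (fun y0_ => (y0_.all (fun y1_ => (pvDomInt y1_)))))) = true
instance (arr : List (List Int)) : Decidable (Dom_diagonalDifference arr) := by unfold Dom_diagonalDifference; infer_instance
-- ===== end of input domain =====

-- B replaces A's two iterative accumulator while-loops by one structural recursion over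
-- the row list returning the signed per-row difference, abs taken once; objective: alternative.
-- Equivalence is about the return value only.

-- ===== PORT A =====
-- A's first while loop: i and j move together; getD is exact here since inside
-- Pre_ every index accessed is nonnegative and in range (Python would raise otherwise).
def aLoop1 (arr : List (List Int)) (n m : Nat) (i : Nat) (d1 : Int) : Int :=
  if i < n ∧ i < m then
    aLoop1 arr n m (i + 1) (d1 + ((arr.getD i []).getD i 0))
  else d1
termination_by n - i

-- A's second while loop: i counts up, j (an Int, may reach -1) counts down.
def aLoop2 (arr : List (List Int)) (n : Nat) (i : Nat) (j : Int) (d2 : Int) : Int :=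
  if i < n ∧ 0 ≤ j then
    aLoop2 arr n (i + 1) (j - 1) (d2 + ((arr.getD i []).getD j.toNat 0))
  else d2
termination_by n - i

def diagonalDifference (arr : List (List Int)) : Int :=
  let n := arr.length
  let d1 := aLoop1 arr n (arr.headD []).length 0 0
  let d2 := aLoop2 arr n 0 ((arr.headD []).length - 1 : Int) 0
  |d1 - d2|

-- ===== PORT B =====
-- Source B's helper _signed: structural recursion over the rows, result built on return.
def bSigned (rows : List (List Int)) (k : Nat) (m : Nat) : Int :=
  match rows with
  | [] => 0
  | row :: rest =>
    if k < m then (row.getD k 0 - row.getD (m - 1 - k) 0) + bSigned rest (k + 1) m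
    else 0

def diagonalDifference_alt (arr : List (List Int)) : Int :=
  let m := (arr.headD []).length
  |bSigned arr 0 m|

-- ===== PRECONDITION & SPEC =====
-- Pre_ excludes exactly the inputs where Python A raises IndexError: the empty matrix
-- (A evaluates len(arr[0]) unconditionally) and ragged matrices whose k-th row is too
-- short for the index k or m-1-k that A accesses.
def Pre_diagonalDifference (arr : List (List Int)) : Prop :=
  arr ≠ [] ∧
  ∀ k < min arr.length (arr.headD []).length,
    k < (arr.getD k []).length ∧ (arr.headD []).length - 1 - k < (arr.getD k []).length
instance (arr : List (List Int)) : Decidable (Pre_diagonalDifference arr) := by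
  unfold Pre_diagonalDifference; infer_instance

def pvWitness_diagonalDifference : List (List Int) := [[1, 2], [3, 4]]

def Spec_diagonalDifference (arr : List (List Int)) (out : Int) : Prop := out = diagonalDifference_alt arr
instance (arr : List (List Int)) (out : Int) : Decidable (Spec_diagonalDifference arr out) := by unfold Spec_diagonalDifference; infer_instance

-- ===== CLAIM (what is proved, stated in full; the proofs are below) =====
def Claim_equal_diagonalDifference : Prop := ∀ (arr : List (List Int)), Dom_diagonalDifference arr → Pre_diagonalDifference arr → Spec_diagonalDifference arr (diagonalDifference arr)

-- ===== LEMMAS AND PROOFS =====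

-- A's first loop sums arr[k][k] over k ∈ [i, min n m).
theorem aLoop1_eq (arr : List (List Int)) (n m : Nat) :
    ∀ i d1, aLoop1 arr n m i d1 =
      d1 + ((List.range' i (min n m - i)).map (fun k => (arr.getD k []).getD k 0)).sum := by
  intro i d1
  induction h : min n m - i generalizing i d1 with
  | zero =>
    rw [aLoop1]
    have : ¬ (i < n ∧ i < m) := by omega
    simp [this]
  | succ t ih =>
    rw [aLoop1]
    have hc : i < n ∧ i < m := by omega
    have : min n m - (i + 1) = t := by omega
    rw [if_pos hc, ih (i + 1) _ this, List.range'_succ, List.map_cons, List.sum_cons]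
    ring

-- A's second loop with j = m-1-i sums arr[k][m-1-k] over k ∈ [i, min n m).
theorem aLoop2_eq (arr : List (List Int)) (n m : Nat) :
    ∀ i d2, aLoop2 arr n i ((m : Int) - 1 - i) d2 =
      d2 + ((List.range' i (min n m - i)).map (fun k => (arr.getD k []).getD (m - 1 - k) 0)).sum := by
  intro i d2
  induction h : min n m - i generalizing i d2 with
  | zero =>
    rw [aLoop2]
    have hng : ¬ (i < n ∧ 0 ≤ (m : Int) - 1 - i) := by omega
    rw [if_neg hng]
    simp
  | succ t ih =>
    rw [aLoop2]
    have hc : i < n ∧ 0 ≤ (m : Int) - 1 - i := by constructor <;> omega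
    have ht : min n m - (i + 1) = t := by omega
    have hj : (m : Int) - 1 - i - 1 = (m : Int) - 1 - (i + 1 : Nat) := by push_cast; ring
    have htn : ((m : Int) - 1 - i).toNat = m - 1 - i := by omega
    rw [if_pos hc, hj, ih (i + 1) _ ht, List.range'_succ, htn, List.map_cons, List.sum_cons]
    ring

-- sums of differences split
theorem sum_map_sub (f g : Nat → Int) (l : List Nat) :
    (l.map (fun t => f t - g t)).sum = (l.map f).sum - (l.map g).sum := by
  induction l with
  | nil => simp
  | cons x xs ih => simp [ih]; ring

-- B's recursion over arr.drop k computes the signed sum of arr[t][t] - arr[t][m-1-t]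
-- for t ∈ [k, min n m).
theorem bSigned_eq (arr : List (List Int)) (m : Nat) :
    ∀ k, bSigned (arr.drop k) k m =
      ((List.range' k (min arr.length m - k)).map
        (fun t => (arr.getD t []).getD t 0 - (arr.getD t []).getD (m - 1 - t) 0)).sum := by
  intro k
  induction h : min arr.length m - k generalizing k with
  | zero =>
    have : (min arr.length m - k) = 0 := h
    rcases Nat.lt_or_ge k arr.length with hk | hk
    · have hm : ¬ k < m := by omega
      rw [List.drop_eq_getElem_cons hk]
      simp [bSigned, hm]
    · rw [List.drop_eq_nil_of_le hk]
      simp [bSigned, this]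
  | succ t ih =>
    have hk : k < arr.length := by omega
    have hm : k < m := by omega
    rw [List.drop_eq_getElem_cons hk]
    show bSigned (arr[k] :: arr.drop (k+1)) k m = _
    rw [List.range'_succ, List.map_cons, List.sum_cons, ← ih (k+1) (by omega)]
    simp [bSigned, hm, List.getD, List.getElem?_eq_getElem hk]

theorem diagonalDifference_spec' (arr : List (List Int)) :
    diagonalDifference arr = diagonalDifference_alt arr := by
  simp only [diagonalDifference, diagonalDifference_alt]
  have hb := bSigned_eq arr (arr.headD []).length 0
  rw [List.drop_zero] at hb
  rw [hb, sum_map_sub,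
      show ((arr.headD []).length : Int) - 1 = ((arr.headD []).length : Int) - 1 - ((0:Nat):Int) by push_cast; ring,
      aLoop1_eq, aLoop2_eq (m := (arr.headD []).length)]
  simp

-- ===== VERDICT (by name: the statement is the Claim_ definition above) =====
theorem diagonalDifference_spec : Claim_equal_diagonalDifference := by
  intro arr _ _
  exact diagonalDifference_spec' arr
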